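-- pv_equiv track=rewrite | github.com/Starry-Sky-World/CloudflareBypassForScraping | cf_bypasser/core/mirror.py | extract_mirror_headers
-- ===== SOURCE A (Python) =====
-- from typing import Dict, Any, Optional, Tuple, AsyncIterator, Union, Mapping, Callable
--
-- def extract_mirror_headers(headers: Dict[str, str]) -> Tuple[Optional[str], Optional[str], bool]:
--     """Extract x-hostname, x-proxy, and x-bypass-cache from headers."""
--     hostname: Optional[str] = None
--     proxy: Optional[str] = None
--     bypass_cache: bool = False
--
--     # Look for headers (case-insensitive)
--     for key, value in headers.items():
--         key_lower = key.lower()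
--         if key_lower == 'x-hostname':
--             hostname = value
--         elif key_lower == 'x-proxy':
--             proxy = value
--         elif key_lower == 'x-bypass-cache':
--             bypass_cache = value.lower() in ('true', '1', 'yes', 'on')
--
--     return hostname, proxy, bypass_cache
-- ===== SOURCE B (Python) =====
-- from typing import Dict, Optional, Tuple
--
-- def extract_mirror_headers(headers: Dict[str, str]) -> Tuple[Optional[str], Optional[str], bool]:
--     """Extract x-hostname, x-proxy, and x-bypass-cache from headers."""
--     items = list(headers.items())
--
--     def last_match(name: str) -> Optional[str]:
--         # Search back-to-front and stop at the first hit: the latest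
--         # occurrence wins, exactly as in forward-overwrite semantics.
--         for key, value in reversed(items):
--             if key.lower() == name:
--                 return value
--         return None
--
--     hostname = last_match('x-hostname')
--     proxy = last_match('x-proxy')
--     bc = last_match('x-bypass-cache')
--     return hostname, proxy, bc is not None and bc.lower() in ('true', '1', 'yes', 'on')
-- ===== Notes on version B (the rewrite author's own statement) =====
-- stated objective: alternative
-- what changed: Replaces A's single forward accumulate-and-overwrite pass with three independent back-to-front searches (first hit from the end = last occurrence), with per-key early exit and no running state.
import Mathlib
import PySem

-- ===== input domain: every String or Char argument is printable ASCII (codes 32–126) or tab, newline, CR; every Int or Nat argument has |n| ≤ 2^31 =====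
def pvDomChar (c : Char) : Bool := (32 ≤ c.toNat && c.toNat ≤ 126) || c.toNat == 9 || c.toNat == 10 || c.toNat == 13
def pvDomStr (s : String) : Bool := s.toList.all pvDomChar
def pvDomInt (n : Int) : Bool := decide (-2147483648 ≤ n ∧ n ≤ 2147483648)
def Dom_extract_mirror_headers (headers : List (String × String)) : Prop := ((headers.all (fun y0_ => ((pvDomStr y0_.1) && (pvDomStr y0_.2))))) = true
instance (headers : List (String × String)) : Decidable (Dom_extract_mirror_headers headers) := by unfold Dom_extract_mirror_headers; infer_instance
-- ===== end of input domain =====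

-- B replaces the forward accumulate-and-overwrite pass by three independent back-to-front searches with early exit (alternative decomposition; same behaviour).


-- ===== PORT A =====
-- A: single forward pass with accumulator state, branch per key, later occurrences overwrite.
def extract_mirror_headers (headers : List (String × String)) : Option String × Option String × Bool :=
  headers.foldl (fun st kv =>
    let key_lower := PySem.Str.lower kv.1
    if key_lower = "x-hostname" then (some kv.2, st.2.1, st.2.2)
    else if key_lower = "x-proxy" then (st.1, some kv.2, st.2.2)
    else if key_lower = "x-bypass-cache" then
      (st.1, st.2.1, decide (PySem.Str.lower kv.2 ∈ (["true", "1", "yes", "on"] : List String)))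
    else st) (none, none, false)

-- ===== PORT B =====
-- last_match: scan back-to-front, return the first hit (= last occurrence), else None.
def pvLastMatch (items : List (String × String)) (name : String) : Option String :=
  (items.reverse.find? (fun kv => PySem.Str.lower kv.1 == name)).map (·.2)

-- bc is not None and bc.lower() in ('true','1','yes','on')
def pvBypassBool (bc : Option String) : Bool :=
  match bc with
  | none => false
  | some v => decide (PySem.Str.lower v ∈ (["true", "1", "yes", "on"] : List String))

def extract_mirror_headers_alt (headers : List (String × String)) : Option String × Option String × Bool :=
  let hostname := pvLastMatch headers "x-hostname"
  let proxy := pvLastMatch headers "x-proxy"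
  let bc := pvLastMatch headers "x-bypass-cache"
  (hostname, proxy, pvBypassBool bc)

-- ===== PRECONDITION & SPEC =====
def Spec_extract_mirror_headers (headers : List (String × String)) (out : Option String × Option String × Bool) : Prop := out = extract_mirror_headers_alt headers
instance (headers : List (String × String)) (out : Option String × Option String × Bool) : Decidable (Spec_extract_mirror_headers headers out) := by unfold Spec_extract_mirror_headers; infer_instance

-- ===== CLAIM (what is proved, stated in full; the proofs are below) =====
def Claim_equal_extract_mirror_headers : Prop := ∀ (headers : List (String × String)), Dom_extract_mirror_headers headers → Spec_extract_mirror_headers headers (extract_mirror_headers headers)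

-- ===== LEMMAS AND PROOFS =====

-- Appending a header updates each back-to-front search: the new pair wins if it matches.
lemma pvLastMatch_concat (l : List (String × String)) (kv : String × String) (name : String) :
    pvLastMatch (l ++ [kv]) name =
      if PySem.Str.lower kv.1 = name then some kv.2 else pvLastMatch l name := by
  simp only [pvLastMatch, List.reverse_append, List.reverse_singleton, List.singleton_append,
    List.find?_cons]
  by_cases h : PySem.Str.lower kv.1 = name
  · simp [h]
  · rw [if_neg h]
    have : (PySem.Str.lower kv.1 == name) = false := beq_false_of_ne h
    simp [this]

-- A's accumulated state over any prefix equals B's three searches on that prefix.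
lemma pv_fold_eq (l : List (String × String)) :
    extract_mirror_headers l =
      (pvLastMatch l "x-hostname", pvLastMatch l "x-proxy",
        pvBypassBool (pvLastMatch l "x-bypass-cache")) := by
  induction l using List.reverseRecOn with
  | nil => simp [extract_mirror_headers, pvLastMatch, pvBypassBool]
  | append_singleton l kv ih =>
    rw [extract_mirror_headers, List.foldl_append, List.foldl_cons, List.foldl_nil,
      ← extract_mirror_headers, ih, pvLastMatch_concat, pvLastMatch_concat, pvLastMatch_concat]
    by_cases hH : PySem.Str.lower kv.1 = "x-hostname"
    · simp only [hH]; simp [pvBypassBool]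
    · by_cases hP : PySem.Str.lower kv.1 = "x-proxy"
      · simp only [hP]; simp [pvBypassBool]
      · by_cases hB : PySem.Str.lower kv.1 = "x-bypass-cache"
        · simp only [hB]; simp [pvBypassBool]
        · simp [hH, hP, hB]

-- ===== VERDICT (by name: the statement is the Claim_ definition above) =====
theorem extract_mirror_headers_spec : Claim_equal_extract_mirror_headers := by
  intro headers _
  show extract_mirror_headers headers = extract_mirror_headers_alt headers
  rw [pv_fold_eq]; rfl
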